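-- pv_equiv track=rewrite | github.com/shzhxh/os-libc-test | script/pygrading/html.py | str2html
-- ===== SOURCE A (Python) =====
-- def str2html(src: str) -> str:
--     """Switch normal string to a html type"""
--     if not src:
--         return ""
--     str_list = src.split("\n")
--     while str_list and (str_list[-1] == "\n" or str_list[-1] == ""):
--         str_list.pop()
--
--     if not str_list:
--         return "<br>"
--
--     for i in range(len(str_list) - 1):
--         str_list[i] += "<br>"
--
--     return "".join(str_list)
-- ===== SOURCE B (Python) =====
-- def str2html(src: str) -> str:
--     """Switch normal string to a html type"""
--     if not src:
--         return ""
--     out = []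
--     pending = 0
--     for ch in src:
--         if ch == "\n":
--             pending += 1
--         else:
--             out.append("<br>" * pending)
--             out.append(ch)
--             pending = 0
--     return "".join(out) if out else "<br>"
-- ===== Notes on version B (the rewrite author's own statement) =====
-- stated objective: alternative
-- what changed: B is a single forward pass over the characters with a pending-newline counter: it never builds the split list, has no pop-while trimming pass and no separate per-segment append loop; each non-newline character flushes the pending newlines as break tags, so trailing newlines are dropped for free and the all-newline case falls out of the empty-output check.
import Mathlib
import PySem

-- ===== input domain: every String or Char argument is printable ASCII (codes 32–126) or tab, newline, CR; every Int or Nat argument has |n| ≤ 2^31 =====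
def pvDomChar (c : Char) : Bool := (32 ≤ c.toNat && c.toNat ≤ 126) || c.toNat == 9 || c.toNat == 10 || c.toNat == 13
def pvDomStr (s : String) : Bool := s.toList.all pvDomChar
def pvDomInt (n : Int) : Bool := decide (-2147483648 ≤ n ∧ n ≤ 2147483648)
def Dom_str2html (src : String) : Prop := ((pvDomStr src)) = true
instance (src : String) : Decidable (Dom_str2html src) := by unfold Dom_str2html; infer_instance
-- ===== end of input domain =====

-- B replaces A's split/pop-while/append-loop/join pipeline by ONE forward pass with a
-- pending-newline counter ('alternative': a single-pass state machine, same cost).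

-- ===== PORT A =====
-- the while-pop loop: check the last element, pop it while it is "\n" or "", repeat
def pvPopA (l : List (List Char)) : List (List Char) :=
  match h : l.getLast? with
  | none => []
  | some x => if x = ['\n'] ∨ x = [] then pvPopA l.dropLast else l
termination_by l.length
decreasing_by
  have hne : l ≠ [] := by intro hl; subst hl; simp at h
  have : 0 < l.length := List.length_pos_iff.mpr hne
  simp [List.length_dropLast]; omega

-- the for loop: str_list[i] += "<br>" for all but the last element
def pvAddBr : List (List Char) → List (List Char)
  | [] => []
  | [x] => [x]
  | x :: y :: xs => (x ++ ['<','b','r','>']) :: pvAddBr (y :: xs)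

-- strings handled as List Char (PySem.Chars is the exact model); "".join via PySem.Chars.join
def str2html (src : String) : String :=
  if src = "" then ""
  else
    let strList := (PySem.Chars.split? src.toList ['\n']).getD []
    let strList2 := pvPopA strList
    if strList2 = [] then "<br>"
    else String.mk (PySem.Chars.join [] (pvAddBr strList2))

-- ===== PORT B =====
-- "<br>" * pending
def pvBrs : Nat → List Char
  | 0 => []
  | p + 1 => ['<','b','r','>'] ++ pvBrs p

-- the body of B's for loop: state = (out, pending)
def pvStepB (st : List (List Char) × Nat) (c : Char) : List (List Char) × Nat :=
  if c = '\n' then (st.1, st.2 + 1)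
  else (st.1 ++ [pvBrs st.2, [c]], 0)

def str2html_alt (src : String) : String :=
  if src = "" then ""
  else
    let st := src.toList.foldl pvStepB ([], 0)
    if st.1 = [] then "<br>" else String.mk (PySem.Chars.join [] st.1)

-- ===== PRECONDITION & SPEC =====
def Spec_str2html (src : String) (out : String) : Prop := out = str2html_alt src
instance (src : String) (out : String) : Decidable (Spec_str2html src out) := by unfold Spec_str2html; infer_instance

-- ===== CLAIM (what is proved, stated in full; the proofs are below) =====
def Claim_equal_str2html : Prop := ∀ (src : String), Dom_str2html src → Spec_str2html src (str2html src)

-- ===== LEMMAS AND PROOFS =====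

-- spec-side split on '\n'
def pvSplitN : List Char → List (List Char)
  | [] => [[]]
  | c :: cs =>
    if c = '\n' then [] :: pvSplitN cs
    else match pvSplitN cs with
      | [] => [[c]]
      | p :: ps => (c :: p) :: ps

-- spec-side replace '\n' → "<br>"
def pvRepl : List Char → List Char
  | [] => []
  | c :: cs => if c = '\n' then '<' :: 'b' :: 'r' :: '>' :: pvRepl cs else c :: pvRepl cs

def pvBad (x : List Char) : Bool := x == ['\n'] || x == []

-- spec-side "drop trailing bad segments", forward recursion
def pvDrop : List (List Char) → List (List Char)
  | [] => []
  | x :: xs =>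
    match pvDrop xs with
    | [] => if pvBad x then [] else [x]
    | ys => x :: ys

-- forward recursion computing B's out-list
def pvG : List Char → Nat → List (List Char)
  | [], _ => []
  | c :: cs, p => if c = '\n' then pvG cs (p + 1) else pvBrs p :: [c] :: pvG cs 0

theorem pvSplitN_ne_nil (cs : List Char) : pvSplitN cs ≠ [] := by
  induction cs with
  | nil => simp [pvSplitN]
  | cons c cs ih =>
    simp only [pvSplitN]
    split
    · simp
    · cases h : pvSplitN cs with
      | nil => simp
      | cons p ps => simp [h]

theorem pvDrop_snoc (l : List (List Char)) (x : List Char) :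
    pvDrop (l ++ [x]) = if pvBad x then pvDrop l else l ++ [x] := by
  induction l with
  | nil => simp [pvDrop]
  | cons y l ih =>
    simp only [List.cons_append, pvDrop, ih]
    by_cases hb : pvBad x
    · simp [hb]
    · simp only [hb, if_false]
      cases l <;> simp [pvDrop]

theorem pvPopA_eq_pvDrop (l : List (List Char)) : pvPopA l = pvDrop l := by
  induction l using List.reverseRecOn with
  | nil => rw [pvPopA]; rfl
  | append_singleton l x ih =>
    rw [pvPopA, pvDrop_snoc]
    split
    · next h => simp at h
    · next y h =>
      have hx : y = x := by
        rw [List.getLast?_concat] at h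
        exact (Option.some_inj.mp h).symm
      subst hx
      by_cases hp : y = ['\n'] ∨ y = []
      · have hb : pvBad y = true := by
          rcases hp with hp | hp <;> simp [pvBad, hp]
        simp [hp, hb, List.dropLast_concat, ih]
      · have hb : pvBad y = false := by
          simp [pvBad]
          constructor
          · intro h1; exact hp (Or.inl h1)
          · intro h1; exact hp (Or.inr h1)
        simp [hp, hb]

theorem pvSplitN_snoc_nl (cs : List Char) : pvSplitN (cs ++ ['\n']) = pvSplitN cs ++ [[]] := by
  induction cs with
  | nil => simp [pvSplitN]
  | cons c cs ih =>
    simp only [List.cons_append, pvSplitN, ih]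
    by_cases hc : c = '\n'
    · simp [hc]
    · simp only [hc, if_false]
      cases h : pvSplitN cs with
      | nil => exact absurd h (pvSplitN_ne_nil cs)
      | cons p ps => simp [h]

theorem pvSplitN_snoc (cs : List Char) (c : Char) (hc : c ≠ '\n') :
    pvSplitN (cs ++ [c]) = (pvSplitN cs).dropLast ++ [((pvSplitN cs).getLastD []) ++ [c]] := by
  induction cs with
  | nil => simp [pvSplitN, hc]
  | cons d cs ih =>
    simp only [List.cons_append, pvSplitN, ih]
    by_cases hd : d = '\n'
    · simp only [hd, if_true]
      cases h : pvSplitN cs with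
      | nil => exact absurd h (pvSplitN_ne_nil cs)
      | cons p ps =>
        cases ps <;> simp [h]
    · simp only [hd, if_false]
      cases h : pvSplitN cs with
      | nil => exact absurd h (pvSplitN_ne_nil cs)
      | cons p ps =>
        cases ps <;> simp [h]

theorem pvSplitOn_go_eq (l : List Char) (fuel : Nat) (cur : List Char) (acc : List (List Char))
    (hf : l.length ≤ fuel) :
    PySem.Chars.splitOn.go ['\n'] fuel l cur acc =
      acc.reverse ++ (match pvSplitN l with
        | [] => []
        | p :: ps => (cur.reverse ++ p) :: ps) := by
  induction l generalizing fuel cur acc with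
  | nil => cases fuel <;> simp [PySem.Chars.splitOn.go, pvSplitN]
  | cons c rest ih =>
    cases fuel with
    | zero => simp at hf
    | succ f =>
      have hf' : rest.length ≤ f := by simp at hf; omega
      rw [PySem.Chars.splitOn.go]
      by_cases hc : c = '\n'
      · have hpre : List.isPrefixOf ['\n'] (c :: rest) = true := by
          simp [List.isPrefixOf, hc]
        simp only [hpre, if_true, List.length_cons, List.drop_succ_cons, List.length_nil, List.drop_zero]
        rw [ih _ _ _ hf']
        cases h : pvSplitN rest with
        | nil => exact absurd h (pvSplitN_ne_nil rest)
        | cons p ps => simp [pvSplitN, hc, h]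
      · have hpre : List.isPrefixOf ['\n'] (c :: rest) = false := by
          simp [List.isPrefixOf]
          intro h1; exact absurd h1.symm hc
        simp only [hpre, Bool.false_eq_true, if_false]
        rw [ih _ _ _ hf']
        cases h : pvSplitN rest with
        | nil => exact absurd h (pvSplitN_ne_nil rest)
        | cons p ps => simp [pvSplitN, hc, h]

theorem pvSplitOn_eq (cs : List Char) : PySem.Chars.splitOn cs ['\n'] = pvSplitN cs := by
  rw [PySem.Chars.splitOn, pvSplitOn_go_eq _ _ _ _ (by omega)]
  cases h : pvSplitN cs with
  | nil => exact absurd h (pvSplitN_ne_nil cs)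
  | cons p ps => simp

theorem pvJoin_cons2 (sep x y : List Char) (xs : List (List Char)) :
    PySem.Chars.join sep (x :: y :: xs) = x ++ sep ++ PySem.Chars.join sep (y :: xs) := by
  simp [PySem.Chars.join, List.intercalate]

theorem pvJoin_singleton (sep x : List Char) : PySem.Chars.join sep [x] = x := by
  simp [PySem.Chars.join, List.intercalate]

theorem pvJoin_splitN (cs : List Char) :
    PySem.Chars.join ['<','b','r','>'] (pvSplitN cs) = pvRepl cs := by
  induction cs with
  | nil => simp [pvSplitN, pvRepl, pvJoin_singleton]
  | cons c cs ih =>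
    cases h : pvSplitN cs with
    | nil => exact absurd h (pvSplitN_ne_nil cs)
    | cons p ps =>
      rw [h] at ih
      by_cases hc : c = '\n'
      · simp only [pvSplitN, hc, if_true, pvRepl, h]
        rw [pvJoin_cons2, ih]
        simp
      · simp only [pvSplitN, hc, if_false, h, pvRepl]
        cases ps with
        | nil =>
          rw [pvJoin_singleton] at ih
          simp [pvJoin_singleton, ih, hc]
        | cons q qs =>
          rw [pvJoin_cons2] at ih ⊢
          simp [hc, ← ih]

theorem pvAddBr_ne_nil (x : List Char) (xs : List (List Char)) : pvAddBr (x :: xs) ≠ [] := by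
  cases xs <;> simp [pvAddBr]

theorem pvJoin_addBr (parts : List (List Char)) (h : parts ≠ []) :
    PySem.Chars.join [] (pvAddBr parts) = PySem.Chars.join ['<','b','r','>'] parts := by
  induction parts with
  | nil => exact absurd rfl h
  | cons x xs ih =>
    cases xs with
    | nil => simp [pvAddBr, pvJoin_singleton]
    | cons y ys =>
      have ih' := ih (by simp)
      cases hy : pvAddBr (y :: ys) with
      | nil => exact absurd hy (pvAddBr_ne_nil y ys)
      | cons a as =>
        show PySem.Chars.join [] ((x ++ ['<','b','r','>']) :: pvAddBr (y :: ys)) = _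
        rw [hy, pvJoin_cons2, ← hy, ih', pvJoin_cons2]
        simp

theorem pvDrop_append_nl (s t : List Char) (ht : ∀ c ∈ t, c = '\n') :
    pvDrop (pvSplitN (s ++ t)) = pvDrop (pvSplitN s) := by
  induction t using List.reverseRecOn with
  | nil => simp
  | append_singleton t c ih =>
    have hc : c = '\n' := ht c (by simp)
    subst hc
    rw [← List.append_assoc, pvSplitN_snoc_nl, pvDrop_snoc]
    have : pvBad [] = true := by simp [pvBad]
    rw [this, if_pos rfl]
    exact ih (fun d hd => ht d (by simp [hd]))

theorem pvDropWhile_head_false {p : Char → Bool} (m : List Char) (c : Char) (rest : List Char)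
    (h : m.dropWhile p = c :: rest) : p c = false := by
  induction m with
  | nil => simp at h
  | cons a as ih =>
    rw [List.dropWhile_cons] at h
    by_cases hp : p a
    · simp [hp] at h; exact ih h
    · simp [hp] at h
      rw [← h.1]
      simp [hp]

-- ===== B-side lemmas =====

theorem pvFoldlB_fst (cs : List Char) (acc : List (List Char)) (p : Nat) :
    (cs.foldl pvStepB (acc, p)).1 = acc ++ pvG cs p := by
  induction cs generalizing acc p with
  | nil => simp [pvG]
  | cons c cs ih =>
    by_cases hc : c = '\n'
    · simp [pvStepB, pvG, hc, ih]
    · simp [pvStepB, pvG, hc, ih]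

theorem pvG_all_nl (t : List Char) (ht : ∀ c ∈ t, c = '\n') (p : Nat) : pvG t p = [] := by
  induction t generalizing p with
  | nil => simp [pvG]
  | cons c t ih =>
    have hc : c = '\n' := ht c (by simp)
    simp [pvG, hc, ih (fun d hd => ht d (by simp [hd]))]

theorem pvG_append_nl (s t : List Char) (ht : ∀ c ∈ t, c = '\n') (p : Nat) :
    pvG (s ++ t) p = pvG s p := by
  induction s generalizing p with
  | nil => simp [pvG, pvG_all_nl t ht p]
  | cons c s ih =>
    by_cases hc : c = '\n' <;> simp [pvG, hc, ih]

theorem pvBrs_snoc (p : Nat) : pvBrs (p + 1) = pvBrs p ++ ['<','b','r','>'] := by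
  induction p with
  | zero => rfl
  | succ q ih =>
    show ['<','b','r','>'] ++ pvBrs (q + 1) = (['<','b','r','>'] ++ pvBrs q) ++ ['<','b','r','>']
    rw [ih]; simp

theorem pvG_flatten (cs : List Char) (p : Nat) (h : cs.getLast? ≠ some '\n') (hne : cs ≠ []) :
    (pvG cs p).flatten = pvBrs p ++ pvRepl cs := by
  induction cs generalizing p with
  | nil => exact absurd rfl hne
  | cons c cs ih =>
    cases cs with
    | nil =>
      have hc : c ≠ '\n' := by simpa using h
      simp [pvG, hc, pvRepl]
    | cons d ds =>
      have h' : (d :: ds).getLast? ≠ some '\n' := by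
        rwa [List.getLast?_cons_cons] at h
      have ih' : ∀ q, (pvG (d :: ds) q).flatten = pvBrs q ++ pvRepl (d :: ds) :=
        fun q => ih q h' (by simp)
      by_cases hc : c = '\n'
      · have hg : pvG (c :: d :: ds) p = pvG (d :: ds) (p + 1) := by
          rw [pvG, if_pos hc]
        have hr : pvRepl (c :: d :: ds) = '<' :: 'b' :: 'r' :: '>' :: pvRepl (d :: ds) := by
          rw [pvRepl, if_pos hc]
        rw [hg, hr, ih' (p + 1), pvBrs_snoc]
        simp
      · have hg : pvG (c :: d :: ds) p = pvBrs p :: [c] :: pvG (d :: ds) 0 := by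
          rw [pvG, if_neg hc]
        have hr : pvRepl (c :: d :: ds) = c :: pvRepl (d :: ds) := by
          rw [pvRepl, if_neg hc]
        simp [hg, hr, ih' 0, pvBrs]

theorem pvRepl_ne_nil (c : Char) (cs : List Char) : pvRepl (c :: cs) ≠ [] := by
  by_cases hc : c = '\n' <;> simp [pvRepl, hc]

theorem pvJoin_nil_flatten (l : List (List Char)) :
    PySem.Chars.join [] l = l.flatten := by
  induction l with
  | nil => simp [PySem.Chars.join, List.intercalate]
  | cons x xs ih =>
    cases xs with
    | nil => simp [pvJoin_singleton]
    | cons y ys =>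
      rw [pvJoin_cons2, ih]
      simp

-- ===== VERDICT (by name: the statement is the Claim_ definition above) =====
theorem str2html_spec : Claim_equal_str2html := by
  intro src _
  show str2html src = str2html_alt src
  by_cases hsrc : src = ""
  · simp [str2html, str2html_alt, hsrc]
  · rw [str2html, str2html_alt, if_neg hsrc, if_neg hsrc]
    simp only [PySem.Chars.split?, List.isEmpty_cons, Bool.false_eq_true, if_false,
      Option.getD_some, pvSplitOn_eq, pvPopA_eq_pvDrop, pvFoldlB_fst, List.nil_append]
    set cs := src.toList with hcs
    set s0 := (cs.reverse.dropWhile (fun c => c == '\n')).reverse with hs0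
    set t0 := (cs.reverse.takeWhile (fun c => c == '\n')).reverse with ht0
    have hsplit : cs = s0 ++ t0 := by
      conv_lhs => rw [← List.reverse_reverse cs,
        ← List.takeWhile_append_dropWhile (p := fun c => c == '\n') (l := cs.reverse)]
      rw [List.reverse_append]
    have htnl : ∀ c ∈ t0, c = '\n' := by
      intro c hc
      rw [ht0, List.mem_reverse] at hc
      have := List.mem_takeWhile_imp hc
      simpa using this
    have hdrop : pvDrop (pvSplitN cs) = pvDrop (pvSplitN s0) := by
      rw [hsplit]; exact pvDrop_append_nl s0 t0 htnl
    have hG : pvG cs 0 = pvG s0 0 := by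
      rw [hsplit]; exact pvG_append_nl s0 t0 htnl 0
    rw [hdrop, hG]
    rcases List.eq_nil_or_concat s0 with hs | ⟨u, c, huc⟩
    · rw [hs]
      have h1 : pvDrop (pvSplitN []) = [] := by simp [pvSplitN, pvDrop, pvBad]
      have h2 : pvG ([] : List Char) 0 = [] := by simp [pvG]
      rw [h1, h2, if_pos rfl, if_pos rfl]
    · have hc : c ≠ '\n' := by
        have hrev : List.dropWhile (fun c => c == '\n') cs.reverse = c :: u.reverse := by
          have : s0.reverse = c :: u.reverse := by rw [huc]; simp
          rw [← this, hs0, List.reverse_reverse]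
        have := pvDropWhile_head_false _ _ _ hrev
        simpa using this
      have hs0ne : s0 ≠ [] := by rw [huc]; simp
      have hlast : s0.getLast? ≠ some '\n' := by
        rw [huc, List.concat_eq_append, List.getLast?_concat]
        simpa using hc
      -- A-side: the pop loop removes nothing
      have hL : pvSplitN s0 = (pvSplitN u).dropLast ++ [((pvSplitN u).getLastD []) ++ [c]] := by
        rw [huc, List.concat_eq_append]; exact pvSplitN_snoc u c hc
      have hbad : pvBad (((pvSplitN u).getLastD []) ++ [c]) = false := by
        simp only [pvBad, Bool.or_eq_false_iff, beq_eq_false_iff_ne]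
        constructor
        · intro h1
          have : c = '\n' := by
            have := congrArg (List.getLast? ·) h1
            simpa using this
          exact hc this
        · simp
      have hdrop2 : pvDrop (pvSplitN s0) = pvSplitN s0 := by
        rw [hL, pvDrop_snoc, hbad]; simp
      have hne : pvSplitN s0 ≠ [] := pvSplitN_ne_nil s0
      -- B-side: the out-list flattens to pvRepl s0 and is nonempty
      have hflat : (pvG s0 0).flatten = pvRepl s0 := by
        have := pvG_flatten s0 0 hlast hs0ne
        simpa [pvBrs] using this
      have hGne : pvG s0 0 ≠ [] := by
        intro hnil
        have : pvRepl s0 = [] := by rw [← hflat, hnil]; rfl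
        obtain ⟨d, ds, hds⟩ := List.exists_cons_of_ne_nil hs0ne
        rw [hds] at this
        exact pvRepl_ne_nil d ds this
      rw [hdrop2, if_neg hne, if_neg hGne]
      rw [pvJoin_addBr _ hne, pvJoin_splitN, pvJoin_nil_flatten, hflat]
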